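-- pv_equiv track=rewrite | github.com/Zandereins/skillforge | skills/schliff/scripts/scoring/formats.py | _yaml_safe
-- ===== SOURCE A (Python) =====
-- def _yaml_safe(value: str) -> str:
--     """Escape a value for safe YAML scalar embedding."""
--     if any(c in value for c in (':', '#', '{', '}', '[', ']', ',', '&', '*',
--                                  '?', '|', '>', '!', "'", '"', '\n', '\r',
--                                  '%', '@', '`')):
--         escaped = (value.replace('\\', '\\\\').replace('"', '\\"')
--                    .replace('\n', '\\n').replace('\r', '\\r'))
--         return f'"{escaped}"'
--     return value
-- ===== SOURCE B (Python) =====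
-- _ESC = {'\\': '\\\\', '"': '\\"', '\n': '\\n', '\r': '\\r'}
-- _TRIGGERS = frozenset((':', '#', '{', '}', '[', ']', ',', '&', '*',
--                        '?', '|', '>', '!', "'", '"', '\n', '\r',
--                        '%', '@', '`'))
--
--
-- def _yaml_safe(value: str) -> str:
--     """Escape a value for safe YAML scalar embedding (single pass)."""
--     escaped = ''
--     needs_quote = False
--     for ch in value:
--         escaped += _ESC.get(ch, ch)
--         if ch in _TRIGGERS:
--             needs_quote = True
--     return f'"{escaped}"' if needs_quote else value
-- ===== Notes on version B (the rewrite author's own statement) =====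
-- stated objective: simpler
-- what changed: Replaces the 20-pattern substring scan plus four chained .replace() passes with one single pass over the characters that builds the escaped string and the needs-quote flag together.
import Mathlib
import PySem

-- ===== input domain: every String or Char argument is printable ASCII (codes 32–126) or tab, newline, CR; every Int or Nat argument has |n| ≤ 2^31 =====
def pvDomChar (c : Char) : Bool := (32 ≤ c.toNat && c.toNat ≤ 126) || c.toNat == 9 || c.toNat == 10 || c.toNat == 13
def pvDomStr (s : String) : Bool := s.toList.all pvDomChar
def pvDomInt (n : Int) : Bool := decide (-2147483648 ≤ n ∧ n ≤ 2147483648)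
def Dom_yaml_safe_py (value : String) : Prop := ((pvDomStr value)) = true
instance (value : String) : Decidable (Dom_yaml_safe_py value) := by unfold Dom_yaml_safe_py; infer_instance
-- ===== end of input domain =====

-- B fuses A's 20-pattern substring scan and four chained replace passes into one
-- single pass over the characters (objective: simpler, one traversal).

-- ===== PORT A =====
-- the tuple of trigger characters from A's `any(...)`
def yamlTriggersA : List Char :=
  [':', '#', '{', '}', '[', ']', ',', '&', '*',
   '?', '|', '>', '!', '\'', '"', '\n', '\r',
   '%', '@', '`']

def yaml_safe_py (value : String) : String :=
  if yamlTriggersA.any (fun c => PySem.Chars.isIn [c] value.toList) then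
    -- value.replace('\\','\\\\').replace('"','\\"').replace('\n','\\n').replace('\r','\\r')
    let escaped :=
      PySem.Chars.replace
        (PySem.Chars.replace
          (PySem.Chars.replace
            (PySem.Chars.replace value.toList ['\\'] ['\\', '\\'])
            ['"'] ['\\', '"'])
          ['\n'] ['\\', 'n'])
        ['\r'] ['\\', 'r']
    String.ofList ('"' :: escaped ++ ['"'])
  else value

-- ===== PORT B =====
-- _ESC dict: char → escape sequence
def escDictB : PySem.Dict Char (List Char) :=
  PySem.Dict.mk
    [('\\', ['\\', '\\']), ('"', ['\\', '"']), ('\n', ['\\', 'n']), ('\r', ['\\', 'r'])]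

-- _TRIGGERS set
def trigSetB : PySem.Set Char :=
  PySem.Set.ofList
    [':', '#', '{', '}', '[', ']', ',', '&', '*',
     '?', '|', '>', '!', '\'', '"', '\n', '\r',
     '%', '@', '`']

def yaml_safe_py_alt (value : String) : String :=
  -- single pass: accumulate (escaped, needs_quote)
  let st := value.toList.foldl
    (fun (st : List Char × Bool) ch =>
      (st.1 ++ PySem.Dict.getD escDictB ch [ch], st.2 || trigSetB.contains ch))
    ([], false)
  if st.2 then String.ofList ('"' :: st.1 ++ ['"']) else value

-- ===== PRECONDITION & SPEC =====
def Spec_yaml_safe_py (value : String) (out : String) : Prop := out = yaml_safe_py_alt value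
instance (value : String) (out : String) : Decidable (Spec_yaml_safe_py value out) := by unfold Spec_yaml_safe_py; infer_instance

-- ===== CLAIM (what is proved, stated in full; the proofs are below) =====
def Claim_equal_yaml_safe_py : Prop := ∀ (value : String), Dom_yaml_safe_py value → Spec_yaml_safe_py value (yaml_safe_py value)

-- ===== LEMMAS AND PROOFS =====

-- the per-character escape map, as B computes it
def escB (ch : Char) : List Char := PySem.Dict.getD escDictB ch [ch]

-- single-character `str.replace` is a per-character flatMap
theorem replace_go_single (a : Char) (r : List Char) :
    ∀ (l acc : List Char),
      PySem.Chars.replace.go [a] r l.length l acc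
        = acc.reverse ++ l.flatMap (fun c => if c = a then r else [c]) := by
  intro l
  induction l with
  | nil => intro acc; simp [PySem.Chars.replace.go]
  | cons c t ih =>
    intro acc
    simp only [List.length_cons, PySem.Chars.replace.go, List.isPrefixOf, List.flatMap_cons]
    by_cases h : c = a
    · subst h
      simp [ih, List.append_assoc]
    · have hba : (a == c) = false := beq_eq_false_iff_ne.mpr (Ne.symm h)
      simp [hba, ih, h]

theorem replace_single (s : List Char) (a : Char) (r : List Char) :
    PySem.Chars.replace s [a] r = s.flatMap (fun c => if c = a then r else [c]) := by
  simpa using replace_go_single a r s []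

-- A's trigger test equals B's per-character membership test
theorem cond_eq (s : List Char) :
    yamlTriggersA.any (fun c => PySem.Chars.isIn [c] s)
      = s.any (fun ch => trigSetB.contains ch) := by
  have hsing : ∀ c : Char, PySem.Chars.isIn [c] s = decide (c ∈ s) := by
    intro c
    by_cases h : c ∈ s
    · obtain ⟨l1, l2, rfl⟩ := List.append_of_mem h
      rw [(PySem.Chars.isIn_iff_infix _ _).mpr ⟨l1, l2, by simp⟩]
      simp
    · rw [(PySem.Chars.isIn_eq_false_iff _ _).mpr
        (fun hinf => h (hinf.subset (by simp : c ∈ [c])))]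
      simp [h]
  have hset : trigSetB = yamlTriggersA := by decide
  rw [Bool.eq_iff_iff]
  simp only [List.any_eq_true, hsing, decide_eq_true_eq, hset, PySem.Set.contains,
    List.contains_iff_mem]
  exact ⟨fun ⟨c, h1, h2⟩ => ⟨c, h2, h1⟩, fun ⟨c, h1, h2⟩ => ⟨c, h2, h1⟩⟩

-- B's fold computes (prefix ++ flatMap escB, flag || any trigger)
theorem foldl_pair (s : List Char) :
    ∀ (acc : List Char) (b : Bool),
      s.foldl (fun (st : List Char × Bool) ch =>
          (st.1 ++ PySem.Dict.getD escDictB ch [ch], st.2 || trigSetB.contains ch)) (acc, b)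
        = (acc ++ s.flatMap escB, b || s.any (fun ch => trigSetB.contains ch)) := by
  induction s with
  | nil => intro acc b; simp
  | cons c t ih =>
    intro acc b
    rw [List.foldl_cons, ih, List.any_cons]
    simp [escB, List.flatMap_cons, List.append_assoc, Bool.or_assoc]

-- composing A's four replace maps per character gives B's escape map
theorem escChar_comp (c : Char) :
    ((((if c = '\\' then ['\\', '\\'] else [c]).flatMap
        (fun c => if c = '"' then ['\\', '"'] else [c])).flatMap
        (fun c => if c = '\n' then ['\\', 'n'] else [c])).flatMap
        (fun c => if c = '\r' then ['\\', 'r'] else [c]))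
      = escB c := by
  by_cases h1 : c = '\\'
  · subst h1; decide
  by_cases h2 : c = '"'
  · subst h2; decide
  by_cases h3 : c = '\n'
  · subst h3; decide
  by_cases h4 : c = '\r'
  · subst h4; decide
  have e1 : (('\\' : Char) == c) = false := beq_eq_false_iff_ne.mpr (Ne.symm h1)
  have e2 : (('"' : Char) == c) = false := beq_eq_false_iff_ne.mpr (Ne.symm h2)
  have e3 : (('\n' : Char) == c) = false := beq_eq_false_iff_ne.mpr (Ne.symm h3)
  have e4 : (('\r' : Char) == c) = false := beq_eq_false_iff_ne.mpr (Ne.symm h4)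
  have hgetD : PySem.Dict.getD escDictB c [c] = [c] := by
    rw [PySem.Dict.getD_eq_get?_getD]
    simp [escDictB, e1, e2, e3, e4, PySem.Dict.get?]
  simp [h1, h2, h3, h4, escB, hgetD]

-- A's four chained replaces equal B's one-pass escape
theorem chain_eq (s : List Char) :
    PySem.Chars.replace
      (PySem.Chars.replace
        (PySem.Chars.replace
          (PySem.Chars.replace s ['\\'] ['\\', '\\'])
          ['"'] ['\\', '"'])
        ['\n'] ['\\', 'n'])
      ['\r'] ['\\', 'r'] = s.flatMap escB := by
  simp only [replace_single, List.flatMap_assoc]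
  exact List.flatMap_congr (fun c _ => by
    simpa [List.flatMap_assoc] using escChar_comp c)

-- ===== VERDICT (by name: the statement is the Claim_ definition above) =====
theorem yaml_safe_py_spec : Claim_equal_yaml_safe_py := by
  intro value _
  unfold Spec_yaml_safe_py yaml_safe_py yaml_safe_py_alt
  simp only [cond_eq, foldl_pair, List.nil_append, Bool.false_or]
  split_ifs with h
  · rw [chain_eq]
  · rfl
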